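-- pv_equiv track=rewrite | github.com/ricotemmink/farm | scripts/check_web_design_system.py | _is_in_comment_context
-- ===== SOURCE A (Python) =====
-- def _is_in_comment_context(line: str, match_start: int) -> bool:
--     """Rough heuristic: skip matches inside single-line comments.
--
--     Tracks string boundaries for both ``//`` and ``/*`` detection.
--     Does not handle multi-line block comments or double-escaped
--     backslashes -- sufficient for typical JSX/TSX patterns.
--     """
--     prefix = line[:match_start]
--     in_string = False
--     for i, ch in enumerate(prefix):
--         if ch in ("'", '"', "`") and (i == 0 or prefix[i - 1] != "\\"):
--             in_string = not in_string
--         if not in_string and prefix[i : i + 2] == "//":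
--             return True
--     if not in_string and "/*" in prefix:
--         last_open = prefix.rfind("/*")
--         return "*/" not in prefix[last_open:]
--     return False
-- ===== SOURCE B (Python) =====
-- def _is_in_comment_context(line: str, match_start: int) -> bool:
--     prefix = line[:match_start]
--     # First pass: instr[i] = in_string state AFTER processing char i.
--     instr = []
--     state = False
--     for i, ch in enumerate(prefix):
--         if ch in ("'", '"', "`") and (i == 0 or prefix[i - 1] != "\\"):
--             state = not state
--         instr.append(state)
--     # An unquoted '//' anywhere in the prefix means a line comment.
--     if any(prefix[i : i + 2] == "//" and not instr[i] for i in range(len(prefix))):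
--         return True
--     final = instr[-1] if instr else False
--     if not final and "/*" in prefix:
--         return "*/" not in prefix[prefix.rfind("/*"):]
--     return False
-- ===== Notes on version B (the rewrite author's own statement) =====
-- stated objective: alternative
-- what changed: Replaces A's single early-return loop (state update interleaved with the '//' test) by two separated passes: one pass records the in-string state after each character into a list, then an any() over indices finds an unquoted '//', with the block-comment tail driven by the recorded final state.
import Mathlib
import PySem

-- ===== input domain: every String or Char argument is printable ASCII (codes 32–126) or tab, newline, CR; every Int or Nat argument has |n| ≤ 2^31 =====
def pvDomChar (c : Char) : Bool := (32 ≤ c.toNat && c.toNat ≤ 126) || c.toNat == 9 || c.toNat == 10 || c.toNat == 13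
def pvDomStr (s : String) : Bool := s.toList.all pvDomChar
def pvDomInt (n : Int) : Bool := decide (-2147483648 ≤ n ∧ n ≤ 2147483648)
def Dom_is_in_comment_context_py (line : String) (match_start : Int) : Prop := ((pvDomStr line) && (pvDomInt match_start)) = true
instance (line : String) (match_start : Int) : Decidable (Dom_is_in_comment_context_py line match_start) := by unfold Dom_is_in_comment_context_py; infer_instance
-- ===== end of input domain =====

-- B separates A's interleaved loop into two passes (a recorded in-string-state list, then an
-- `any` over indices for the unquoted '//'); same result, alternative decomposition, no speed claim.

-- ===== PORT A =====
-- A's single loop: toggles the string state and early-returns on an unquoted '//';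
-- on loop exit it falls through to the block-comment tail.
def pvALoop (pfx : List Char) : List Char → Int → Bool → Bool
  | [], _, in_string =>
      if !in_string && PySem.Chars.isIn ['/', '*'] pfx then
        let last_open := PySem.Chars.rfind pfx ['/', '*']
        !(PySem.Chars.isIn ['*', '/'] (PySem.List.slice pfx (some last_open) none))
      else false
  | ch :: rest, i, in_string =>
      let in_string' :=
        if (ch == '\'' || ch == '"' || ch == '`') &&
            (i == 0 || PySem.List.pyGetD pfx (i - 1) ' ' != '\\') then !in_string else in_string
      if !in_string' && (PySem.List.slice pfx (some i) (some (i + 2)) == ['/', '/']) then true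
      else pvALoop pfx rest (i + 1) in_string'

def is_in_comment_context_py (line : String) (match_start : Int) : Bool :=
  let pfx := PySem.List.slice line.toList none (some match_start)
  pvALoop pfx pfx 0 false

-- ===== PORT B =====
-- B pass 1: instr[i] = the in-string state AFTER processing character i.
def pvBStates (pfx : List Char) : List Char → Int → Bool → List Bool
  | [], _, _ => []
  | ch :: rest, i, state =>
      let state' :=
        if (ch == '\'' || ch == '"' || ch == '`') &&
            (i == 0 || PySem.List.pyGetD pfx (i - 1) ' ' != '\\') then !state else state
      state' :: pvBStates pfx rest (i + 1) state'

def is_in_comment_context_py_alt (line : String) (match_start : Int) : Bool :=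
  let pfx := PySem.List.slice line.toList none (some match_start)
  let instr := pvBStates pfx pfx 0 false
  if (PySem.List.pyRange 0 pfx.length 1).any (fun j =>
        (PySem.List.slice pfx (some j) (some (j + 2)) == ['/', '/']) &&
        !(PySem.List.pyGetD instr j false)) then
    true
  else
    let final := instr.getLastD false
    if !final && PySem.Chars.isIn ['/', '*'] pfx then
      !(PySem.Chars.isIn ['*', '/']
          (PySem.List.slice pfx (some (PySem.Chars.rfind pfx ['/', '*'])) none))
    else false

-- ===== PRECONDITION & SPEC =====
def Spec_is_in_comment_context_py (line : String) (match_start : Int) (out : Bool) : Prop := out = is_in_comment_context_py_alt line match_start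
instance (line : String) (match_start : Int) (out : Bool) : Decidable (Spec_is_in_comment_context_py line match_start out) := by unfold Spec_is_in_comment_context_py; infer_instance

-- ===== CLAIM (what is proved, stated in full; the proofs are below) =====
def Claim_equal_is_in_comment_context_py : Prop := ∀ (line : String) (match_start : Int), Dom_is_in_comment_context_py line match_start → Spec_is_in_comment_context_py line match_start (is_in_comment_context_py line match_start)

-- ===== LEMMAS AND PROOFS =====

-- the shared block-comment tail, abstracted for the proof only
def pvTail (pfx : List Char) (in_string : Bool) : Bool :=
  if !in_string && PySem.Chars.isIn ['/', '*'] pfx then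
    !(PySem.Chars.isIn ['*', '/']
        (PySem.List.slice pfx (some (PySem.Chars.rfind pfx ['/', '*'])) none))
  else false

lemma pvALoop_nil (pfx : List Char) (i : Int) (s : Bool) :
    pvALoop pfx [] i s = pvTail pfx s := by
  simp [pvALoop, pvTail]

lemma pyGetD_cons_pos {α : Type} (x : α) (xs : List α) (d : α) (n : Int) (h : 1 ≤ n) :
    PySem.List.pyGetD (x :: xs) n d = PySem.List.pyGetD xs (n - 1) d := by
  obtain ⟨k, rfl⟩ : ∃ k : Nat, n = (k : Int) + 1 := ⟨(n - 1).toNat, by omega⟩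
  rw [show ((k : Int) + 1) = ((k + 1 : Nat) : Int) by push_cast; ring,
    PySem.List.pyGetD_natCast, show ((k + 1 : Nat) : Int) - 1 = ((k : Nat) : Int) by push_cast; ring,
    PySem.List.pyGetD_natCast]
  simp [List.getD]

lemma pvAny_congr {α : Type} (l : List α) (f g : α → Bool) (h : ∀ x ∈ l, f x = g x) :
    l.any f = l.any g := by
  induction l with
  | nil => rfl
  | cons a t ih =>
      simp only [List.any_cons, h a (List.mem_cons_self), ih (fun x hx => h x (List.mem_cons_of_mem a hx))]

lemma pvKey (pfx : List Char) (rest : List Char) (i : Int) (s : Bool) :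
    pvALoop pfx rest i s =
      (((PySem.List.pyRange i (i + rest.length) 1).any (fun j =>
          (PySem.List.slice pfx (some j) (some (j + 2)) == ['/', '/']) &&
          !(PySem.List.pyGetD (pvBStates pfx rest i s) (j - i) false)))
        || pvTail pfx ((pvBStates pfx rest i s).getLastD s)) := by
  induction rest generalizing i s with
  | nil =>
      simp [pvALoop_nil, pvBStates, ]
  | cons ch rest ih =>
      rw [pvALoop, pvBStates]
      have hlen : (i : Int) + ((ch :: rest).length : Int) = (i + 1) + (rest.length : Int) := by
        simp; ring
      rw [hlen, PySem.List.pyRange_one_cons (by omega : i < (i + 1) + (rest.length : Int))]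
      set s' := if (ch == '\'' || ch == '"' || ch == '`') &&
          (i == 0 || PySem.List.pyGetD pfx (i - 1) ' ' != '\\') then !s else s with hs'
      simp only [List.any_cons, sub_self]
      have h0 : PySem.List.pyGetD (s' :: pvBStates pfx rest (i + 1) s') (0 : Int) false = s' := by
        simp
      rw [h0]
      by_cases hc : (!s' && (PySem.List.slice pfx (some i) (some (i + 2)) == ['/', '/'])) = true
      · rw [if_pos hc]
        rw [show ((PySem.List.slice pfx (some i) (some (i + 2)) == ['/', '/']) && !s') = true by
          rw [Bool.and_comm]; exact hc]
        simp
      · rw [if_neg hc]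
        have hc' : ((PySem.List.slice pfx (some i) (some (i + 2)) == ['/', '/']) && !s') = false := by
          rw [Bool.and_comm]; exact Bool.eq_false_iff.mpr hc
        rw [hc', Bool.false_or, ih (i + 1) s', List.getLastD_cons]
        congr 1
        apply pvAny_congr
        intro j hj
        have hji : i + 1 ≤ j := (PySem.List.mem_pyRange_one.mp hj).1
        rw [pyGetD_cons_pos _ _ _ (j - i) (by omega), sub_sub]

-- ===== VERDICT (by name: the statement is the Claim_ definition above) =====
theorem is_in_comment_context_py_spec : Claim_equal_is_in_comment_context_py := by
  intro line match_start _
  show is_in_comment_context_py line match_start = is_in_comment_context_py_alt line match_start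
  unfold is_in_comment_context_py is_in_comment_context_py_alt
  set pfx := PySem.List.slice line.toList none (some match_start) with hp
  rw [pvKey pfx pfx 0 false]
  have hAny : (PySem.List.pyRange 0 (0 + (pfx.length : Int)) 1).any (fun j =>
        (PySem.List.slice pfx (some j) (some (j + 2)) == ['/', '/']) &&
        !(PySem.List.pyGetD (pvBStates pfx pfx 0 false) (j - 0) false))
      = (PySem.List.pyRange 0 (pfx.length : Int) 1).any (fun j =>
        (PySem.List.slice pfx (some j) (some (j + 2)) == ['/', '/']) &&
        !(PySem.List.pyGetD (pvBStates pfx pfx 0 false) j false)) := by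
    rw [zero_add]
    apply pvAny_congr
    intro j _
    rw [sub_zero]
  rw [hAny]
  by_cases h : (PySem.List.pyRange 0 (pfx.length : Int) 1).any (fun j =>
        (PySem.List.slice pfx (some j) (some (j + 2)) == ['/', '/']) &&
        !(PySem.List.pyGetD (pvBStates pfx pfx 0 false) j false)) = true
  · simp [h]
  · rw [Bool.eq_false_iff.mpr h, Bool.false_or, if_neg h]
    simp [pvTail]
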